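-- pv_equiv track=rewrite | github.com/pietro1991-dot/teklab_ai | backend_api/app.py | sanitize_chunk_text
-- ===== SOURCE A (Python) =====
-- def sanitize_chunk_text(raw_text, exclusion_terms):
--     """Remove lines that reference excluded product families to reduce LLM confusion."""
--     if not raw_text:
--         return raw_text
--     if not exclusion_terms:
--         return raw_text
--     sanitized_lines = []
--     for line in raw_text.splitlines():
--         line_lower = line.lower()
--         if any(term in line_lower for term in exclusion_terms):
--             continue
--         sanitized_lines.append(line)
--     if any(line.strip().startswith('|') for line in sanitized_lines):
--         sanitized_lines = convert_markdown_table_to_bullets(sanitized_lines)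
--     return "\n".join(sanitized_lines).strip()
--
-- def convert_markdown_table_to_bullets(lines):
--     """Convert simple Markdown tables into bullet list statements."""
--     converted = []
--     i = 0
--     total = len(lines)
--     while i < total:
--         line = lines[i]
--         stripped = line.strip()
--         if stripped.startswith('|') and stripped.endswith('|'):
--             header_line = stripped
--             headers = [cell.strip() for cell in header_line.strip('|').split('|')]
--             if all(not h or set(h) <= {'-', ':'} for h in headers):
--                 i += 1
--                 continue
--             i += 1
--             # Skip separator row if present
--             if i < total and set(lines[i].strip()) <= {'|', '-', ' ', ':'}:
--                 i += 1
--             while i < total: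
--                 content_line = lines[i].strip()
--                 if not content_line.startswith('|') or not content_line.endswith('|'):
--                     break
--                 cells = [cell.strip() for cell in content_line.strip('|').split('|')]
--                 cells += [''] * (len(headers) - len(cells))
--                 bullet_parts = []
--                 for header, value in zip(headers, cells):
--                     if header and value:
--                         bullet_parts.append(f"{header}: {value}")
--                 if bullet_parts:
--                     converted.append("- " + "; ".join(bullet_parts))
--                 i += 1
--             continue
--         converted.append(line)
--         i += 1
--     return converted
-- ===== SOURCE B (Python) =====
-- def sanitize_chunk_text(raw_text, exclusion_terms):
--     """Remove lines mentioning excluded terms; flatten Markdown tables to bullets (single pass)."""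
--     if not raw_text or not exclusion_terms:
--         return raw_text
--     kept = [line for line in raw_text.splitlines()
--             if not any(term in line.lower() for term in exclusion_terms)]
--     out = []
--     headers = None          # headers of the current table, or None when outside a table
--     expect_sep = False      # True right after a header row: one separator row may be skipped
--     for line in kept:
--         s = line.strip()
--         if headers is not None:
--             if expect_sep and set(s) <= {'|', '-', ' ', ':'}:
--                 expect_sep = False
--                 continue
--             expect_sep = False
--             if s.startswith('|') and s.endswith('|'):
--                 cells = [c.strip() for c in s.strip('|').split('|')]
--                 parts = [f"{h}: {v}" for h, v in zip(headers, cells) if h and v]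
--                 if parts:
--                     out.append("- " + "; ".join(parts))
--                 continue
--             headers = None
--         if s.startswith('|') and s.endswith('|'):
--             hs = [c.strip() for c in s.strip('|').split('|')]
--             if not all(not h or set(h) <= {'-', ':'} for h in hs):
--                 headers = hs
--                 expect_sep = True
--             continue
--         out.append(line)
--     return "\n".join(out).strip()
-- ===== Notes on version B (the rewrite author's own statement) =====
-- stated objective: simpler
-- what changed: Replaces A's index-driven outer/inner while loops (with a separate table-presence pre-scan) by a single forward fold over the filtered lines carrying an explicit (headers, expect-separator) state, and writes the line filter and bullet construction as comprehensions.
import Mathlib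
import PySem

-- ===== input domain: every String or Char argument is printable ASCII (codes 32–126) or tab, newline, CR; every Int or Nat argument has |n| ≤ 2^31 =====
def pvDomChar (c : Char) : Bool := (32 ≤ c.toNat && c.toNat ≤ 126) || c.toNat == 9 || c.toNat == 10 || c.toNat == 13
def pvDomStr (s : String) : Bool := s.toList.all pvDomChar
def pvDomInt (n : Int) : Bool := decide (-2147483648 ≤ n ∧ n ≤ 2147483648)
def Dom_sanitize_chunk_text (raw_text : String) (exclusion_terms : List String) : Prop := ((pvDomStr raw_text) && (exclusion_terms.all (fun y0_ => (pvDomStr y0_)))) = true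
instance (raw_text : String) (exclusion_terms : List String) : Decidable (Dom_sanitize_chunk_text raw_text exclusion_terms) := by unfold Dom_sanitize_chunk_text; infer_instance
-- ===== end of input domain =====

-- B replaces A's index-driven outer/inner while loops over the line list by one forward fold with
-- an explicit (headers, expect-separator) state, drops the redundant table-presence pre-scan, and
-- filters lines with a comprehension; objective: simpler, same output.

-- ===== PORT A =====
-- shared small helpers (each names one expression of the Python; used by both ports)
-- stripped.startswith('|') and stripped.endswith('|')
def pvIsRow (s : String) : Bool := PySem.Str.startswith s "|" && PySem.Str.endswith s "|"
-- set(x) <= {'|', '-', ' ', ':'}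
def pvSepLike (s : String) : Bool := s.toList.all (fun c => c == '|' || c == '-' || c == ' ' || c == ':')
-- not h or set(h) <= {'-', ':'}
def pvHdrOnlySep (h : String) : Bool := h == "" || h.toList.all (fun c => c == '-' || c == ':')
-- [cell.strip() for cell in x.strip('|').split('|')]   (sep "|" ≠ "", so split? is always some)
def pvCells (s : String) : List String := ((PySem.Str.split? (PySem.Str.stripChars s "|") "|").getD []).map PySem.Str.strip
-- any(term in line_lower for term in exclusion_terms)
def pvExcluded (terms : List String) (line : String) : Bool :=
  let line_lower := PySem.Str.lower line
  terms.any (fun t => PySem.Str.isIn t line_lower)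

-- A's bullet_parts loop: for header, value in zip(headers, cells_padded): if header and value: append
def pvPartsA (headers cells : List String) : List String :=
  (headers.zip (cells ++ List.replicate (headers.length - cells.length) "")).foldl
    (fun acc hv => if hv.1 != "" && hv.2 != "" then acc ++ [hv.1 ++ ": " ++ hv.2] else acc) []

-- A's inner while loop: consume content rows, return (emitted bullets, remaining lines)
def pvInnerA (headers : List String) : List String → List String × List String
  | [] => ([], [])
  | l :: ls =>
    let c := PySem.Str.strip l
    if pvIsRow c then
      let parts := pvPartsA headers (pvCells c)
      let r := pvInnerA headers ls
      (if parts.isEmpty then r.1 else ("- " ++ PySem.Str.join "; " parts) :: r.1, r.2)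
    else ([], l :: ls)

theorem pvInnerA_snd_le (headers : List String) (ls : List String) :
    (pvInnerA headers ls).2.length ≤ ls.length := by
  induction ls with
  | nil => simp [pvInnerA]
  | cons l t ih =>
    simp only [pvInnerA]
    split
    · simpa using Nat.le_succ_of_le ih
    · simp

-- 'Skip separator row if present' step of A's outer loop
def pvSkipSep : List String → List String
  | [] => []
  | r :: rs => if pvSepLike (PySem.Str.strip r) then rs else r :: rs

theorem pvSkipSep_le (rest : List String) : (pvSkipSep rest).length ≤ rest.length := by
  cases rest with
  | nil => simp [pvSkipSep]
  | cons r rs => simp only [pvSkipSep]; split <;> simp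

-- A's convert_markdown_table_to_bullets (index i ↦ the remaining suffix of lines)
def pvConvA : List String → List String
  | [] => []
  | line :: rest =>
    let s := PySem.Str.strip line
    if pvIsRow s then
      let headers := pvCells s
      if headers.all pvHdrOnlySep then pvConvA rest
      else
        let rest2 := pvSkipSep rest
        (pvInnerA headers rest2).1 ++ pvConvA (pvInnerA headers rest2).2
    else line :: pvConvA rest
termination_by ls => ls.length
decreasing_by
  · simp
  · have h1 := pvInnerA_snd_le (pvCells (PySem.Str.strip line)) (pvSkipSep rest)
    have h2 := pvSkipSep_le rest
    simp only [List.length_cons]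
    omega
  · simp

-- A's filtering loop (continue / append)
def pvFilterA (terms : List String) (lines : List String) : List String :=
  lines.foldl (fun acc line => if pvExcluded terms line then acc else acc ++ [line]) []

def sanitize_chunk_text (raw_text : String) (exclusion_terms : List String) : String :=
  if raw_text == "" then raw_text
  else if exclusion_terms.isEmpty then raw_text
  else
    let sanitized_lines := pvFilterA exclusion_terms (PySem.Str.splitlines raw_text)
    let sanitized_lines :=
      if sanitized_lines.any (fun l => PySem.Str.startswith (PySem.Str.strip l) "|")
      then pvConvA sanitized_lines else sanitized_lines
    PySem.Str.strip (PySem.Str.join "\n" sanitized_lines)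

-- ===== PORT B =====
-- parts = [f"{h}: {v}" for h, v in zip(headers, cells) if h and v]
def pvPartsB (headers cells : List String) : List String :=
  ((headers.zip cells).filter (fun hv => hv.1 != "" && hv.2 != "")).map
    (fun hv => hv.1 ++ ": " ++ hv.2)

-- the out-of-table logic of B's loop body (reached with headers = None or after resetting it)
def pvStepB0 (out : List String) (line s : String) : List String × Option (List String × Bool) :=
  if pvIsRow s then
    let hs := pvCells s
    if !(hs.all pvHdrOnlySep) then (out, some (hs, true)) else (out, none)
  else (out ++ [line], none)

-- one iteration of B's single fold; state = (out, headers? with expect-separator flag)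
def pvStepB (acc : List String × Option (List String × Bool)) (line : String) :
    List String × Option (List String × Bool) :=
  let s := PySem.Str.strip line
  match acc.2 with
  | some (headers, expect) =>
    if expect && pvSepLike s then (acc.1, some (headers, false))
    else if pvIsRow s then
      let parts := pvPartsB headers (pvCells s)
      (if parts.isEmpty then acc.1 else acc.1 ++ ["- " ++ PySem.Str.join "; " parts],
       some (headers, false))
    else pvStepB0 acc.1 line s
  | none => pvStepB0 acc.1 line s

def pvConvB (lines : List String) : List String := (lines.foldl pvStepB ([], none)).1

def sanitize_chunk_text_alt (raw_text : String) (exclusion_terms : List String) : String :=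
  if raw_text == "" || exclusion_terms.isEmpty then raw_text
  else
    let kept := (PySem.Str.splitlines raw_text).filter (fun line => !pvExcluded exclusion_terms line)
    PySem.Str.strip (PySem.Str.join "\n" (pvConvB kept))

-- ===== PRECONDITION & SPEC =====
def Spec_sanitize_chunk_text (raw_text : String) (exclusion_terms : List String) (out : String) : Prop := out = sanitize_chunk_text_alt raw_text exclusion_terms
instance (raw_text : String) (exclusion_terms : List String) (out : String) : Decidable (Spec_sanitize_chunk_text raw_text exclusion_terms out) := by unfold Spec_sanitize_chunk_text; infer_instance

-- ===== CLAIM (what is proved, stated in full; the proofs are below) =====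
def Claim_equal_sanitize_chunk_text : Prop := ∀ (raw_text : String) (exclusion_terms : List String), Dom_sanitize_chunk_text raw_text exclusion_terms → Spec_sanitize_chunk_text raw_text exclusion_terms (sanitize_chunk_text raw_text exclusion_terms)

-- ===== LEMMAS AND PROOFS =====

-- A's bullet_parts equals B's comprehension: padding cells with "" adds only pairs filtered out.
theorem pvFilterZipPad (hs : List String) : ∀ (cs : List String) (k : Nat),
    ((hs.zip (cs ++ List.replicate k "")).filter (fun hv => hv.1 != "" && hv.2 != "")) =
      ((hs.zip cs).filter (fun hv => hv.1 != "" && hv.2 != "")) := by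
  induction hs with
  | nil => simp
  | cons h hs ih =>
    intro cs k
    cases cs with
    | cons c cs' =>
      simp only [List.cons_append, List.zip_cons_cons, List.filter_cons, ih cs' k]
    | nil =>
      cases k with
      | zero => simp
      | succ k' =>
        have h2 : List.filter (fun hv => hv.1 != "" && hv.2 != "") (hs.zip (List.replicate k' "")) = [] := by
          simpa using ih [] k'
        simp [List.replicate_succ, h2]

theorem pvParts_eq (headers cells : List String) : pvPartsA headers cells = pvPartsB headers cells := by
  unfold pvPartsA pvPartsB
  rw [PySem.List.foldl_append_if (fun (hv : String × String) => hv.1 != "" && hv.2 != "")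
        (fun hv => hv.1 ++ ": " ++ hv.2)
        (headers.zip (cells ++ List.replicate (headers.length - cells.length) "")) []]
  rw [pvFilterZipPad]
  simp

-- one step of B from out is the step from [] with out prepended
theorem pvStepB_frame (out : List String) (st : Option (List String × Bool)) (l : String) :
    pvStepB (out, st) l = (out ++ (pvStepB ([], st) l).1, (pvStepB ([], st) l).2) := by
  cases st with
  | none => simp only [pvStepB, pvStepB0]; split_ifs <;> simp
  | some p =>
    obtain ⟨hs, e⟩ := p
    simp only [pvStepB, pvStepB0]
    split_ifs <;> simp

theorem pvFoldB_frame (ls : List String) (out : List String) (st : Option (List String × Bool)) :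
    (ls.foldl pvStepB (out, st)).1 = out ++ (ls.foldl pvStepB ([], st)).1 := by
  induction ls generalizing out st with
  | nil => simp
  | cons l t ih =>
    simp only [List.foldl_cons, pvStepB_frame out st l]
    rw [ih, ih (pvStepB ([], st) l).1 (pvStepB ([], st) l).2]
    simp [List.append_assoc]

-- with expect = true and a non-separator line, the step behaves as with expect = false
theorem pvStepB_true_false (out : List String) (hs : List String) (l : String)
    (h : pvSepLike (PySem.Str.strip l) = false) :
    pvStepB (out, some (hs, true)) l = pvStepB (out, some (hs, false)) l := by
  simp [pvStepB, h]

-- B's in-table fold = A's inner loop bullets, then the fold restarts outside the table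
theorem pvFoldB_inner (ls : List String) (hs : List String) (out : List String) :
    (ls.foldl pvStepB (out, some (hs, false))).1 =
      out ++ (pvInnerA hs ls).1 ++ ((pvInnerA hs ls).2.foldl pvStepB ([], none)).1 := by
  induction ls generalizing out with
  | nil => simp [pvInnerA]
  | cons l t ih =>
    by_cases hr : pvIsRow (PySem.Str.strip l) = true
    · have hstep : pvStepB (out, some (hs, false)) l =
          (if (pvPartsB hs (pvCells (PySem.Str.strip l))).isEmpty then out
           else out ++ ["- " ++ PySem.Str.join "; " (pvPartsB hs (pvCells (PySem.Str.strip l)))],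
           some (hs, false)) := by
        simp [pvStepB, hr]
      have hA : pvInnerA hs (l :: t) =
          (if (pvPartsA hs (pvCells (PySem.Str.strip l))).isEmpty then (pvInnerA hs t).1
           else ("- " ++ PySem.Str.join "; " (pvPartsA hs (pvCells (PySem.Str.strip l)))) :: (pvInnerA hs t).1,
           (pvInnerA hs t).2) := by
        simp only [pvInnerA, hr, if_true]
      rw [List.foldl_cons, hstep, hA, pvParts_eq]
      by_cases he : (pvPartsB hs (pvCells (PySem.Str.strip l))).isEmpty
      · simpa [he] using ih out
      · simpa [he, List.append_assoc] using ih (out ++ ["- " ++ PySem.Str.join "; " (pvPartsB hs (pvCells (PySem.Str.strip l)))])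
    · have hstep : pvStepB (out, some (hs, false)) l = pvStepB (out, none) l := by
        simp [pvStepB, hr]
      have hA : pvInnerA hs (l :: t) = ([], l :: t) := by
        simp only [pvInnerA, hr]; simp
      rw [List.foldl_cons, hstep, hA, ← List.foldl_cons]
      simpa using pvFoldB_frame (l :: t) out none

theorem pvConv_eq_aux (n : Nat) : ∀ ls : List String, ls.length ≤ n → ∀ out : List String,
    (ls.foldl pvStepB (out, none)).1 = out ++ pvConvA ls := by
  induction n with
  | zero =>
    intro ls hls out
    have : ls = [] := List.eq_nil_of_length_eq_zero (Nat.le_zero.mp hls)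
    subst this; simp [pvConvA]
  | succ n ih =>
    intro ls hls out
    cases ls with
    | nil => simp [pvConvA]
    | cons line rest =>
      simp only [List.length_cons] at hls
      by_cases hr : pvIsRow (PySem.Str.strip line) = true
      · by_cases hh : (pvCells (PySem.Str.strip line)).all pvHdrOnlySep = true
        · have hstep : pvStepB (out, none) line = (out, none) := by
            simp [pvStepB, pvStepB0, hr, hh]
          rw [List.foldl_cons, hstep, ih rest (by omega) out]
          rw [pvConvA]; simp only [hr, hh, if_true]
        · have hstep : pvStepB (out, none) line = (out, some (pvCells (PySem.Str.strip line), true)) := by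
            simp [pvStepB, pvStepB0, hr, hh]
          rw [List.foldl_cons, hstep]
          have hCA : pvConvA (line :: rest) =
              (pvInnerA (pvCells (PySem.Str.strip line)) (pvSkipSep rest)).1 ++
                pvConvA (pvInnerA (pvCells (PySem.Str.strip line)) (pvSkipSep rest)).2 := by
            rw [pvConvA]; simp only [hr, hh, if_true, Bool.false_eq_true, if_false]
          set hsx := pvCells (PySem.Str.strip line) with hhs
          cases rest with
          | nil =>
            simp only [List.foldl_nil]
            simp [hCA, pvSkipSep, pvInnerA, pvConvA]
          | cons r rs =>
            have hinner : ∀ ls2 : List String, ls2.length ≤ n →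
                (ls2.foldl pvStepB (out, some (hsx, false))).1 =
                  out ++ (pvInnerA hsx ls2).1 ++ pvConvA (pvInnerA hsx ls2).2 := by
              intro ls2 h2
              rw [pvFoldB_inner]
              have hlen := pvInnerA_snd_le hsx ls2
              rw [ih (pvInnerA hsx ls2).2 (by omega) []]
              simp
            by_cases hsep : pvSepLike (PySem.Str.strip r) = true
            · have hstep2 : pvStepB (out, some (hsx, true)) r = (out, some (hsx, false)) := by
                simp [pvStepB, hsep]
              rw [List.foldl_cons, hstep2, hinner rs (by simp at hls; omega)]
              rw [hCA]
              simp [pvSkipSep, hsep]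
            · have hstep2 : pvStepB (out, some (hsx, true)) r = pvStepB (out, some (hsx, false)) r := by
                exact pvStepB_true_false out hsx r (by simpa using hsep)
              rw [List.foldl_cons, hstep2, ← List.foldl_cons, hinner (r :: rs) (by omega)]
              rw [hCA]
              simp [pvSkipSep, hsep]
      · have hstep : pvStepB (out, none) line = (out ++ [line], none) := by
          simp [pvStepB, pvStepB0, hr]
        rw [List.foldl_cons, hstep, ih rest (by omega) (out ++ [line])]
        rw [pvConvA]; simp only [hr, Bool.false_eq_true, if_false]
        simp [List.append_assoc]

theorem pvConv_eq (ls : List String) : pvConvB ls = pvConvA ls := by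
  simpa [pvConvB] using pvConv_eq_aux ls.length ls le_rfl []

theorem pvConvB_id (ls : List String)
    (h : ls.any (fun l => PySem.Str.startswith (PySem.Str.strip l) "|") = false) :
    pvConvB ls = ls := by
  have key : ∀ (ls2 : List String) (out : List String),
      (∀ l ∈ ls2, PySem.Str.startswith (PySem.Str.strip l) "|" = false) →
      (ls2.foldl pvStepB (out, none)).1 = out ++ ls2 := by
    intro ls2
    induction ls2 with
    | nil => simp
    | cons l t ih =>
      intro out hall
      have h0 : PySem.Str.startswith (PySem.Str.strip l) "|" = false := hall l (by simp)
      have hr : pvIsRow (PySem.Str.strip l) = false := by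
        simp only [pvIsRow, h0, Bool.false_and]
      have hstep : pvStepB (out, none) l = (out ++ [l], none) := by
        simp [pvStepB, pvStepB0, hr]
      rw [List.foldl_cons, hstep, ih (out ++ [l]) (fun x hx => hall x (by simp [hx]))]
      simp
  rw [List.any_eq_false] at h
  exact (key ls [] (by intro l hl; simpa using h l hl)).trans (by simp)

theorem pvFilter_eq (terms : List String) (lines : List String) :
    pvFilterA terms lines = lines.filter (fun line => !pvExcluded terms line) := by
  unfold pvFilterA
  rw [PySem.List.foldl_congr_mem _ _
        (fun acc line => if (!pvExcluded terms line) = true then acc ++ [line] else acc) _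
        (by intro acc x _; cases h : pvExcluded terms x <;> simp [h])]
  simpa using PySem.List.foldl_append_if_eq_filter (fun line => !pvExcluded terms line) lines []

-- ===== VERDICT (by name: the statement is the Claim_ definition above) =====
theorem sanitize_chunk_text_spec : Claim_equal_sanitize_chunk_text := by
  intro raw_text exclusion_terms _
  unfold Spec_sanitize_chunk_text sanitize_chunk_text sanitize_chunk_text_alt
  by_cases h0 : raw_text == ""
  · simp [h0]
  · by_cases h1 : exclusion_terms.isEmpty
    · simp [h0, h1]
    · rw [Bool.not_eq_true] at h0 h1
      by_cases h2 : ((PySem.Str.splitlines raw_text).filter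
          (fun line => !pvExcluded exclusion_terms line)).any
          (fun l => PySem.Str.startswith (PySem.Str.strip l) "|") = true
      · simp only [h0, h1, Bool.or_self, Bool.false_eq_true, if_false, pvFilter_eq, h2,
          if_true, pvConv_eq]
      · rw [Bool.not_eq_true] at h2
        simp only [h0, h1, Bool.or_self, Bool.false_eq_true, if_false, pvFilter_eq, h2,
          pvConvB_id _ h2]
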